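-- pv_equiv track=rewrite | github.com/samrunner321/Saalbach | modules/knowledge_base.py | _split_markdown_into_chunks
-- ===== SOURCE A (Python) =====
-- from typing import List, Dict, Any, Tuple, Optional, Union
--
-- def _split_markdown_into_chunks(content: str, max_chunk_size: int = 1000) -> List[Tuple[str, Dict[str, Any]]]:
--     """
--     Teilt einen Markdown-Text in sinnvolle Chunks für die Vektordatenbank.
--
--     Args:
--         content: Der Markdown-Inhalt
--         max_chunk_size: Maximale Anzahl an Zeichen pro Chunk
--
--     Returns:
--         Liste von Tuples (chunk_text, metadata)
--     """
--     # Überschriften als Trennpunkte verwenden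
--     chunks = []
--     current_section = ""
--     current_heading = "Allgemein"
--     current_subheading = ""  # Leerer String statt None
--
--     lines = content.split('\n')
--
--     for line in lines:
--         # Hauptüberschrift erkennen (# Titel)
--         if line.startswith('# '):
--             # Vorherigen Abschnitt speichern, wenn vorhanden
--             if current_section.strip():
--                 chunks.append((
--                     current_section.strip(),
--                     {
--                         "heading": current_heading,
--                         "subheading": current_subheading
--                     }
--                 ))
--
--             current_heading = line.lstrip('# ').strip()
--             current_subheading = ""  # Leerer String statt None
--             current_section = ""
--
--         # Unterüberschrift erkennen (## Titel)
--         elif line.startswith('## '):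
--             # Vorherigen Abschnitt speichern, wenn vorhanden
--             if current_section.strip():
--                 chunks.append((
--                     current_section.strip(),
--                     {
--                         "heading": current_heading,
--                         "subheading": current_subheading
--                     }
--                 ))
--
--             current_subheading = line.lstrip('## ').strip()
--             current_section = ""
--
--         # Inhalt zum aktuellen Abschnitt hinzufügen
--         else:
--             current_section += line + '\n'
--
--             # Chunk splitten, wenn er zu groß wird
--             if len(current_section) > max_chunk_size:
--                 chunks.append((
--                     current_section.strip(),
--                     {
--                         "heading": current_heading,
--                         "subheading": current_subheading
--                     }
--                 ))
--                 current_section = ""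
--
--     # Letzten Abschnitt speichern, wenn vorhanden
--     if current_section.strip():
--         chunks.append((
--             current_section.strip(),
--             {
--                 "heading": current_heading,
--                 "subheading": current_subheading
--             }
--         ))
--
--     return chunks
-- ===== SOURCE B (Python) =====
-- def _split_markdown_into_chunks(content: str, max_chunk_size: int = 1000):
--     # Pass 1: split the document into segments (content lines + the heading
--     # metadata that was current while they were accumulated).
--     segments = []
--     cur_lines = []
--     heading = "Allgemein"
--     subheading = ""
--     for line in content.split('\n'):
--         if line.startswith('# '):
--             segments.append((cur_lines, heading, subheading))
--             cur_lines = []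
--             heading = line.lstrip('# ').strip()
--             subheading = ""
--         elif line.startswith('## '):
--             segments.append((cur_lines, heading, subheading))
--             cur_lines = []
--             subheading = line.lstrip('## ').strip()
--         else:
--             cur_lines.append(line)
--     segments.append((cur_lines, heading, subheading))
--
--     # Pass 2: greedily size-split each segment.
--     chunks = []
--     for seg_lines, h, sub in segments:
--         section = ""
--         for line in seg_lines:
--             section += line + '\n'
--             if len(section) > max_chunk_size:
--                 chunks.append((section.strip(), {"heading": h, "subheading": sub}))
--                 section = ""
--         if section.strip():
--             chunks.append((section.strip(), {"heading": h, "subheading": sub}))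
--     return chunks
-- ===== Notes on version B (the rewrite author's own statement) =====
-- stated objective: alternative
-- what changed: Replaces the single interleaved state-machine loop by a two-phase decomposition: first pass groups lines into (lines, heading, subheading) segments at '# '/'## ' boundaries, second pass greedily size-splits each segment into chunks.
import Mathlib
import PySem

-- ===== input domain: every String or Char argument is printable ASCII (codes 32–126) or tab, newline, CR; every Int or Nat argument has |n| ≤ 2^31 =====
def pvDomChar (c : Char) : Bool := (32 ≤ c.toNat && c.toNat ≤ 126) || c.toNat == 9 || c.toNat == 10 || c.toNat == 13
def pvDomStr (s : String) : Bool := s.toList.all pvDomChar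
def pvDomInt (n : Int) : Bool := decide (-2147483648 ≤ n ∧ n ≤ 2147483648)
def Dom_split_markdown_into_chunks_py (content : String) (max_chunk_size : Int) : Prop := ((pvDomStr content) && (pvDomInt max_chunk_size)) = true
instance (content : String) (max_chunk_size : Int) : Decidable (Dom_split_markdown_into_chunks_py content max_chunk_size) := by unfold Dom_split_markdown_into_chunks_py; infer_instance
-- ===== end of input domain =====

-- B replaces A's single interleaved state-machine loop by a two-phase decomposition
-- (segment at headings, then greedily size-split each segment); same cost, no speed claim.


-- shared literal helpers (used verbatim by both Pythons)
-- {"heading": h, "subheading": sub} as an association list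
def pvMeta (h sub : List Char) : List (String × String) :=
  [("heading", String.ofList h), ("subheading", String.ofList sub)]

-- line.lstrip('# ').strip() — lstrip with the char set {'#',' '} is a hand port
-- (exact: Python's lstrip(chars) drops leading characters that are in chars), then PySem strip
def pvHeadText (line : List Char) : List Char :=
  PySem.Chars.strip (line.dropWhile (fun c => c == '#' || c == ' '))

-- ===== PORT A =====
-- A's loop state: (chunks, current_section, current_heading, current_subheading)
def pvStepA (max_chunk_size : Int)
    (st : List (String × (List (String × String))) × List Char × List Char × List Char)
    (line : List Char) :
    List (String × (List (String × String))) × List Char × List Char × List Char :=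
  let (chunks, sec, h, sub) := st
  if PySem.Chars.startswith line ['#', ' '] then
    ((if PySem.Chars.strip sec ≠ [] then chunks ++ [(String.ofList (PySem.Chars.strip sec), pvMeta h sub)] else chunks),
     [], pvHeadText line, [])
  else if PySem.Chars.startswith line ['#', '#', ' '] then
    ((if PySem.Chars.strip sec ≠ [] then chunks ++ [(String.ofList (PySem.Chars.strip sec), pvMeta h sub)] else chunks),
     [], h, pvHeadText line)
  else
    let sec' := sec ++ line ++ ['\n']
    if (sec'.length : Int) > max_chunk_size then
      (chunks ++ [(String.ofList (PySem.Chars.strip sec'), pvMeta h sub)], [], h, sub)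
    else
      (chunks, sec', h, sub)

-- final 'if current_section.strip(): chunks.append(...)'
def pvFinishA (st : List (String × (List (String × String))) × List Char × List Char × List Char) :
    List (String × (List (String × String))) :=
  let (chunks, sec, h, sub) := st
  if PySem.Chars.strip sec ≠ [] then chunks ++ [(String.ofList (PySem.Chars.strip sec), pvMeta h sub)] else chunks

def split_markdown_into_chunks_py (content : String) (max_chunk_size : Int) :
    List (String × (List (String × String))) :=
  let lines := PySem.Chars.splitOn content.toList ['\n']
  pvFinishA (lines.foldl (pvStepA max_chunk_size) ([], [], "Allgemein".toList, []))

-- ===== PORT B =====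
-- pass 1: build segments (lines, heading, subheading)
def pvSegStep
    (st : List (List (List Char) × List Char × List Char) × List (List Char) × List Char × List Char)
    (line : List Char) :
    List (List (List Char) × List Char × List Char) × List (List Char) × List Char × List Char :=
  let (segs, cur, h, sub) := st
  if PySem.Chars.startswith line ['#', ' '] then
    (segs ++ [(cur, h, sub)], [], pvHeadText line, [])
  else if PySem.Chars.startswith line ['#', '#', ' '] then
    (segs ++ [(cur, h, sub)], [], h, pvHeadText line)
  else
    (segs, cur ++ [line], h, sub)

def pvSegments (lines : List (List Char)) : List (List (List Char) × List Char × List Char) :=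
  let st := lines.foldl pvSegStep ([], [], "Allgemein".toList, [])
  st.1 ++ [(st.2.1, st.2.2.1, st.2.2.2)]

-- pass 2: greedy size-split of one segment
def pvGreedyStep (max_chunk_size : Int) (h sub : List Char)
    (st : List (String × (List (String × String))) × List Char) (line : List Char) :
    List (String × (List (String × String))) × List Char :=
  let (out, sec) := st
  let sec' := sec ++ line ++ ['\n']
  if (sec'.length : Int) > max_chunk_size then
    (out ++ [(String.ofList (PySem.Chars.strip sec'), pvMeta h sub)], [])
  else
    (out, sec')

def pvSplitSeg (max_chunk_size : Int) (seg : List (List Char) × List Char × List Char) :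
    List (String × (List (String × String))) :=
  let (ls, h, sub) := seg
  let (out, sec) := ls.foldl (pvGreedyStep max_chunk_size h sub) ([], [])
  if PySem.Chars.strip sec ≠ [] then out ++ [(String.ofList (PySem.Chars.strip sec), pvMeta h sub)] else out

def split_markdown_into_chunks_py_alt (content : String) (max_chunk_size : Int) :
    List (String × (List (String × String))) :=
  (pvSegments (PySem.Chars.splitOn content.toList ['\n'])).flatMap (pvSplitSeg max_chunk_size)

-- ===== PRECONDITION & SPEC =====
def Spec_split_markdown_into_chunks_py (content : String) (max_chunk_size : Int) (out : List (String × (List (String × String)))) : Prop := out = split_markdown_into_chunks_py_alt content max_chunk_size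
instance (content : String) (max_chunk_size : Int) (out : List (String × (List (String × String)))) : Decidable (Spec_split_markdown_into_chunks_py content max_chunk_size out) := by unfold Spec_split_markdown_into_chunks_py; infer_instance

-- ===== CLAIM (what is proved, stated in full; the proofs are below) =====
def Claim_equal_split_markdown_into_chunks_py : Prop := ∀ (content : String) (max_chunk_size : Int), Dom_split_markdown_into_chunks_py content max_chunk_size → Spec_split_markdown_into_chunks_py content max_chunk_size (split_markdown_into_chunks_py content max_chunk_size)

-- ===== LEMMAS AND PROOFS =====

-- reference recursion both loop shapes are reduced to
def pvGo (max_chunk_size : Int) (sec h sub : List Char) :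
    List (List Char) → List (String × (List (String × String)))
  | [] => if PySem.Chars.strip sec ≠ [] then [(String.ofList (PySem.Chars.strip sec), pvMeta h sub)] else []
  | line :: rest =>
    if PySem.Chars.startswith line ['#', ' '] then
      (if PySem.Chars.strip sec ≠ [] then [(String.ofList (PySem.Chars.strip sec), pvMeta h sub)] else []) ++
        pvGo max_chunk_size [] (pvHeadText line) [] rest
    else if PySem.Chars.startswith line ['#', '#', ' '] then
      (if PySem.Chars.strip sec ≠ [] then [(String.ofList (PySem.Chars.strip sec), pvMeta h sub)] else []) ++
        pvGo max_chunk_size [] h (pvHeadText line) rest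
    else
      let sec' := sec ++ line ++ ['\n']
      if (sec'.length : Int) > max_chunk_size then
        (String.ofList (PySem.Chars.strip sec'), pvMeta h sub) :: pvGo max_chunk_size [] h sub rest
      else
        pvGo max_chunk_size sec' h sub rest

theorem pvA_eq_go (max_chunk_size : Int) :
    ∀ (lines : List (List Char)) (chunks : List (String × (List (String × String)))) (sec h sub : List Char),
      pvFinishA (lines.foldl (pvStepA max_chunk_size) (chunks, sec, h, sub)) =
        chunks ++ pvGo max_chunk_size sec h sub lines := by
  intro lines
  induction lines with
  | nil => intro chunks sec h sub; simp [pvFinishA, pvGo]; split <;> simp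
  | cons line rest ih =>
    intro chunks sec h sub
    simp only [List.foldl_cons, pvStepA, pvGo]
    split_ifs with h1 h2 h3 <;> simp [ih, List.append_assoc]

theorem pvB_eq_go (max_chunk_size : Int) :
    ∀ (lines : List (List Char)) (segs : List (List (List Char) × List Char × List Char))
      (cur : List (List Char)) (h sub : List Char),
      ((lines.foldl pvSegStep (segs, cur, h, sub)).1 ++
        [((lines.foldl pvSegStep (segs, cur, h, sub)).2.1,
          (lines.foldl pvSegStep (segs, cur, h, sub)).2.2.1,
          (lines.foldl pvSegStep (segs, cur, h, sub)).2.2.2)]).flatMap (pvSplitSeg max_chunk_size) =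
        segs.flatMap (pvSplitSeg max_chunk_size) ++
          (cur.foldl (pvGreedyStep max_chunk_size h sub) ([], [])).1 ++
          pvGo max_chunk_size (cur.foldl (pvGreedyStep max_chunk_size h sub) ([], [])).2 h sub lines := by
  intro lines
  induction lines with
  | nil =>
    intro segs cur h sub
    simp only [List.foldl_nil, List.flatMap_append, List.flatMap_singleton]
    simp [pvSplitSeg, pvGo]
    split <;> simp
  | cons line rest ih =>
    intro segs cur h sub
    by_cases h1 : PySem.Chars.startswith line ['#', ' '] = true
    · simp only [List.foldl_cons, pvSegStep, if_pos h1]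
      rw [ih]
      simp only [pvGo, if_pos h1, List.flatMap_append, List.flatMap_singleton,
        List.foldl_nil, List.append_assoc]
      simp [pvSplitSeg]
      split <;> simp
    · by_cases h2 : PySem.Chars.startswith line ['#', '#', ' '] = true
      · simp only [List.foldl_cons, pvSegStep, if_neg h1, if_pos h2]
        rw [ih]
        simp only [pvGo, if_neg h1, if_pos h2, List.flatMap_append, List.flatMap_singleton,
          List.foldl_nil, List.append_assoc]
        simp [pvSplitSeg]
        split <;> simp
      · simp only [List.foldl_cons, pvSegStep, if_neg h1, if_neg h2]
        rw [ih]
        rw [List.foldl_append, List.foldl_cons, List.foldl_nil]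
        simp only [pvGo, if_neg h1, if_neg h2]
        generalize cur.foldl (pvGreedyStep max_chunk_size h sub) ([], []) = st
        obtain ⟨out, sec⟩ := st
        simp only [pvGreedyStep]
        split_ifs with h3 <;> simp [List.append_assoc]

-- ===== VERDICT (by name: the statement is the Claim_ definition above) =====
theorem split_markdown_into_chunks_py_spec : Claim_equal_split_markdown_into_chunks_py := by
  intro content max_chunk_size _
  unfold Spec_split_markdown_into_chunks_py split_markdown_into_chunks_py split_markdown_into_chunks_py_alt pvSegments
  simp only []
  rw [pvA_eq_go, pvB_eq_go]
  simp
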